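-- pv_equiv track=rewrite | github.com/opencoca/VIDEO-vidsum | code/vtt_to_srt.py | srt_segment_number
-- ===== SOURCE A (Python) =====
-- def srt_segment_number(lines):
--     """
--     Number segments for use as an SRT file
--
--     Ars:
--         lines: a list of lines
--
--     Returns:
--         srt: a list of numbered segments
--     """
--
--     i = 0
--     seg = 1
--     while i < len(lines):
--         if lines[i].startswith("00:0"):
--             lines.insert(i, str(seg))
--             seg += 1
--             i +=2
--         else:
--             i +=1
--
--     return lines
-- ===== SOURCE B (Python) =====
-- def srt_segment_number(lines):
--     """
--     Number segments for use as an SRT file (one forward pass building the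
--     output, then written back into the same list object in place).
--     """
--     out = []
--     seg = 1
--     for line in lines:
--         if line.startswith("00:0"):
--             out.append(str(seg))
--             seg += 1
--         out.append(line)
--     lines[:] = out
--     return lines
-- ===== Notes on version B (the rewrite author's own statement) =====
-- stated objective: simpler
-- what changed: Replaces A's index-driven while loop that repeatedly mutates the list with insert() (re-stepping the index by 2 after each insertion) by a single forward pass that builds the numbered output with an append-only accumulator and writes it back in place; no index arithmetic and no mid-list insertions.
import Mathlib
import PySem

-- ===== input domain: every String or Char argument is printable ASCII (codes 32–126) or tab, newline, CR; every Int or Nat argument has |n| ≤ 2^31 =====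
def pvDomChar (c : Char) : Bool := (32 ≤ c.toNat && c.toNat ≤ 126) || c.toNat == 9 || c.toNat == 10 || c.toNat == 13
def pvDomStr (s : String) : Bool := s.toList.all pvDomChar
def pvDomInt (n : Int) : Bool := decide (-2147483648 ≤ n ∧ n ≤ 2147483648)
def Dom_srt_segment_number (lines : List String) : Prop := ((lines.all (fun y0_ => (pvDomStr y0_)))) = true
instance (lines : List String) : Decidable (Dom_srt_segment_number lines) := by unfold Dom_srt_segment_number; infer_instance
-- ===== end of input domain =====

-- B changes only the construction strategy (single append-only pass instead of index-stepped in-place inserts);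
-- in Python both mutate the argument list in place and return it — the theorem below is about the returned value.

-- ===== PORT A =====
-- A's while loop: state is the (mutated) list, the index i and the counter seg;
-- each iteration either inserts str(seg) at i (then i += 2) or steps i by 1.
def srt_segment_number_loop (lines : List String) (i : Nat) (seg : Int) : List String :=
  if h : i < lines.length then
    if PySem.Str.startswith lines[i] "00:0" then
      srt_segment_number_loop (lines.insertIdx i (PySem.Int.toStr seg)) (i + 2) (seg + 1)
    else
      srt_segment_number_loop lines (i + 1) seg
  else lines
termination_by lines.length - i
decreasing_by
  · simp [List.length_insertIdx, Nat.le_of_lt h]; omega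
  · omega

def srt_segment_number (lines : List String) : List String :=
  srt_segment_number_loop lines 0 1

-- ===== PORT B =====
-- B's for loop over the lines, building `out` with an append-only accumulator.
def srt_segment_number_alt (lines : List String) : List String :=
  (lines.foldl
    (fun st line =>
      if PySem.Str.startswith line "00:0" then
        (st.1 ++ [PySem.Int.toStr st.2, line], st.2 + 1)
      else
        (st.1 ++ [line], st.2))
    (([] : List String), (1 : Int))).1

-- ===== PRECONDITION & SPEC =====
def Spec_srt_segment_number (lines : List String) (out : List String) : Prop := out = srt_segment_number_alt lines
instance (lines : List String) (out : List String) : Decidable (Spec_srt_segment_number lines out) := by unfold Spec_srt_segment_number; infer_instance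

-- ===== CLAIM (what is proved, stated in full; the proofs are below) =====
def Claim_equal_srt_segment_number : Prop := ∀ (lines : List String), Dom_srt_segment_number lines → Spec_srt_segment_number lines (srt_segment_number lines)

-- ===== LEMMAS AND PROOFS =====

-- Inserting at the length of a prefix splices the element between prefix and suffix.
theorem insertIdx_at_prefix_length {α : Type} (pre rest : List α) (x : α) :
    (pre ++ rest).insertIdx pre.length x = pre ++ x :: rest := by
  induction pre with
  | nil => simp
  | cons a pre ih => simp [List.insertIdx_succ_cons, ih]

-- The bridge: A's loop, started with i pointing just past a processed prefix `pre`,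
-- equals B's fold run over the remaining suffix starting from accumulator (pre, seg).
theorem srt_segment_number_bridge (rest : List String) (pre : List String) (seg : Int) :
    srt_segment_number_loop (pre ++ rest) pre.length seg =
      (rest.foldl
        (fun st line =>
          if PySem.Str.startswith line "00:0" then
            (st.1 ++ [PySem.Int.toStr st.2, line], st.2 + 1)
          else
            (st.1 ++ [line], st.2))
        (pre, seg)).1 := by
  induction rest generalizing pre seg with
  | nil =>
    rw [srt_segment_number_loop]
    simp
  | cons l rest ih =>
    rw [srt_segment_number_loop]
    have hlen : pre.length < (pre ++ l :: rest).length := by simp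
    have hget : (pre ++ l :: rest)[pre.length]'hlen = l := by
      simp
    rw [dif_pos hlen]
    simp only [hget, List.foldl_cons]
    by_cases hs : PySem.Str.startswith l "00:0"
    · rw [if_pos hs, if_pos hs]
      have hins : (pre ++ l :: rest).insertIdx pre.length (PySem.Int.toStr seg)
          = (pre ++ [PySem.Int.toStr seg, l]) ++ rest := by
        rw [insertIdx_at_prefix_length]; simp
      have hlen2 : pre.length + 2 = (pre ++ [PySem.Int.toStr seg, l]).length := by simp
      rw [hins, hlen2, ih]
    · rw [if_neg hs, if_neg hs]
      have hre : pre ++ l :: rest = (pre ++ [l]) ++ rest := by simp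
      have hlen1 : pre.length + 1 = (pre ++ [l]).length := by simp
      rw [hre, hlen1, ih]

-- ===== VERDICT (by name: the statement is the Claim_ definition above) =====
theorem srt_segment_number_spec : Claim_equal_srt_segment_number := by
  intro lines _
  unfold Spec_srt_segment_number srt_segment_number srt_segment_number_alt
  have := srt_segment_number_bridge lines [] 1
  simpa using this
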